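-- pv_equiv track=rewrite | github.com/nguyenphat57/forge | packages/forge-core/shared/workflow_stage_machine.py | next_stage_after
-- ===== SOURCE A (Python) =====
-- def next_stage_after(stage_name: str, required_stage_chain: list[str], stages: dict) -> str | None:
--     if stage_name not in required_stage_chain:
--         return None
--     for candidate in required_stage_chain[required_stage_chain.index(stage_name) + 1 :]:
--         payload = stages.get(candidate)
--         if isinstance(payload, dict) and payload.get("status") == "skipped":
--             continue
--         return candidate
--     return None
-- ===== SOURCE B (Python) =====
-- def next_stage_after(stage_name: str, required_stage_chain: list[str], stages: dict) -> str | None: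
--     ans = None
--     nxt = None  # first non-skipped stage strictly after the current position
--     for stage in reversed(required_stage_chain):
--         if stage == stage_name:
--             ans = nxt
--         payload = stages.get(stage)
--         if not (isinstance(payload, dict) and payload.get("status") == "skipped"):
--             nxt = stage
--     return ans
-- ===== Notes on version B (the rewrite author's own statement) =====
-- stated objective: alternative
-- what changed: B traverses the chain right-to-left once, carrying for each position the first non-skipped stage strictly after it, and records that carried value whenever the current element equals stage_name (front-most occurrence overwrites last), replacing A's membership test + index() + slice + forward scan.
import Mathlib
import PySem

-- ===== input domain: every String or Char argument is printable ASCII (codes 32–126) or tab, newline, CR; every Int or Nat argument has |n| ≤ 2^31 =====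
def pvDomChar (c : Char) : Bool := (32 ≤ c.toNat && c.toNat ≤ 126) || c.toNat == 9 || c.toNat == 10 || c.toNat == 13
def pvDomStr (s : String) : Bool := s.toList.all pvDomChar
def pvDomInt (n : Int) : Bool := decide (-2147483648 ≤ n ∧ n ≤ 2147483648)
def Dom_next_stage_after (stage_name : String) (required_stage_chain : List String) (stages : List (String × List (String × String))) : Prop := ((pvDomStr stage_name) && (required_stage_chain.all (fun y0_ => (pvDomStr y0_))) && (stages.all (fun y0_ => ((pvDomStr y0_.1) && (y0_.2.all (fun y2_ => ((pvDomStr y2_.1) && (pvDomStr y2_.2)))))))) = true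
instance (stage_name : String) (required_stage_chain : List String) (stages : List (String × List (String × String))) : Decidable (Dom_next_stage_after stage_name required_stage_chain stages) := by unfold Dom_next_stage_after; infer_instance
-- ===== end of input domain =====

-- B replaces A's membership+index()+slice+forward-scan with one right-to-left pass carrying the first non-skipped stage after each position (alternative decomposition, same O(n) cost).


-- ===== PORT A =====
-- the `for candidate in …` loop of A: payload = stages.get(candidate); skip if dict with status == skipped
def pvA_scan (stages : List (String × List (String × String))) : List String → Option String
  | [] => none
  | c :: rest =>
    match (PySem.Dict.mk stages).get? c with
    | some payload =>
      if (PySem.Dict.mk payload).get? "status" = some "skipped" then pvA_scan stages rest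
      else some c
    | none => some c

def next_stage_after (stage_name : String) (required_stage_chain : List String) (stages : List (String × List (String × String))) : Option String :=
  if stage_name ∉ required_stage_chain then none
  else
    match PySem.List.index? required_stage_chain stage_name with
    | none => none  -- unreachable: stage_name ∈ chain
    | some i => pvA_scan stages (PySem.List.slice required_stage_chain (some ((i : Int) + 1)) none)

-- ===== PORT B =====
-- one iteration of B's loop over reversed(chain): state = (ans, nxt)
def pvB_step (stage_name : String) (stages : List (String × List (String × String)))
    (st : Option String × Option String) (stage : String) : Option String × Option String :=
  let ans := if stage == stage_name then st.2 else st.1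
  let nxt :=
    match (PySem.Dict.mk stages).get? stage with
    | some payload =>
      if (PySem.Dict.mk payload).get? "status" = some "skipped" then st.2 else some stage
    | none => some stage
  (ans, nxt)

def next_stage_after_alt (stage_name : String) (required_stage_chain : List String) (stages : List (String × List (String × String))) : Option String :=
  (required_stage_chain.reverse.foldl (pvB_step stage_name stages) (none, none)).1

-- ===== PRECONDITION & SPEC =====
def Spec_next_stage_after (stage_name : String) (required_stage_chain : List String) (stages : List (String × List (String × String))) (out : Option String) : Prop := out = next_stage_after_alt stage_name required_stage_chain stages
instance (stage_name : String) (required_stage_chain : List String) (stages : List (String × List (String × String))) (out : Option String) : Decidable (Spec_next_stage_after stage_name required_stage_chain stages out) := by unfold Spec_next_stage_after; infer_instance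

-- ===== CLAIM (what is proved, stated in full; the proofs are below) =====
def Claim_equal_next_stage_after : Prop := ∀ (stage_name : String) (required_stage_chain : List String) (stages : List (String × List (String × String))), Dom_next_stage_after stage_name required_stage_chain stages → Spec_next_stage_after stage_name required_stage_chain stages (next_stage_after stage_name required_stage_chain stages)

-- ===== LEMMAS AND PROOFS =====

-- B's fold over the reversed chain, as a foldr over the chain itself
def pvB_run (n : String) (st : List (String × List (String × String))) (l : List String) :
    Option String × Option String :=
  l.foldr (fun x y => pvB_step n st y x) (none, none)

theorem pvB_alt_eq_run (n : String) (st : List (String × List (String × String))) (l : List String) :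
    next_stage_after_alt n l st = (pvB_run n st l).1 := by
  unfold next_stage_after_alt pvB_run
  rw [List.foldl_reverse]

-- the carried `nxt` component is A's forward scan of the whole list
theorem pvB_snd (n : String) (st : List (String × List (String × String))) (l : List String) :
    (pvB_run n st l).2 = pvA_scan st l := by
  induction l with
  | nil => rfl
  | cons c rest ih =>
    show (pvB_step n st (pvB_run n st rest) c).2 = _
    unfold pvB_step pvA_scan
    cases h : (PySem.Dict.mk st).get? c with
    | none => simp
    | some payload => by_cases hs : (PySem.Dict.mk payload).get? "status" = some "skipped" <;>
        simp [hs, ih]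

-- A's structural recursion: handling the head of the chain
theorem pvA_cons (n c : String) (rest : List String) (st : List (String × List (String × String))) :
    next_stage_after n (c :: rest) st =
      if c = n then pvA_scan st rest else next_stage_after n rest st := by
  by_cases hc : c = n
  · subst hc
    unfold next_stage_after
    rw [PySem.List.index?_cons_self]
    simp only [List.mem_cons, true_or, not_true_eq_false, if_false]
    rw [show ((0 : Nat) : Int) + 1 = ((1 : Nat) : Int) from by norm_num,
      PySem.List.slice_from_natCast]
    rfl
  · rw [if_neg hc]
    have hcn : ¬ n = c := fun h => hc h.symm
    have hidx := PySem.List.index?_cons_of_ne (x := c) (v := n) rest hc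
    unfold next_stage_after
    rw [hidx]
    by_cases hm : n ∈ rest
    · obtain ⟨i, hi⟩ := Option.isSome_iff_exists.mp ((PySem.List.index?_isSome_iff rest n).mpr hm)
      rw [hi]
      rw [if_neg (by simp [hm, hcn] : ¬ (n ∉ c :: rest)), if_neg (not_not_intro hm)]
      simp only [Option.map_some]
      rw [show (((i + 1 : Nat) : Int) + 1) = ((i + 2 : Nat) : Int) from by push_cast; ring,
        PySem.List.slice_from_natCast,
        show ((i : Int) + 1) = ((i + 1 : Nat) : Int) from by push_cast; ring,
        PySem.List.slice_from_natCast,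
        show i + 2 = (i + 1) + 1 from rfl, List.drop_succ_cons]
    · have hnone := (PySem.List.index?_eq_none_iff rest n).mpr hm
      rw [hnone]
      simp [hm, hcn]

theorem pv_main (n : String) (st : List (String × List (String × String))) (chain : List String) :
    next_stage_after n chain st = next_stage_after_alt n chain st := by
  rw [pvB_alt_eq_run]
  induction chain with
  | nil => rfl
  | cons c rest ih =>
    rw [pvA_cons,
      show pvB_run n st (c :: rest) = pvB_step n st (pvB_run n st rest) c from rfl]
    unfold pvB_step
    by_cases hc : c = n
    · simp [hc, pvB_snd]
    · simp [hc, ih]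

-- ===== VERDICT (by name: the statement is the Claim_ definition above) =====
theorem next_stage_after_spec : Claim_equal_next_stage_after := by
  intro n chain st _
  unfold Spec_next_stage_after
  exact pv_main n st chain
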